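-- pv_equiv track=rewrite | github.com/seerraa16/examen_sorpresa | AlphabetWar.py | alphabet_war
-- ===== SOURCE A (Python) =====
-- def alphabet_war(fight):
--     left_side = {"w": 4, "p": 3, "b": 2, "s": 1}
--     right_side = {"m": 4, "q": 3, "d": 2, "z": 1}
--     left_score = 0
--     right_score = 0
--     for i in fight:
--         if i in left_side:
--             left_score += left_side[i]
--         elif i in right_side:
--             right_score += right_side[i]
--     if left_score > right_score:
--         return "Left side wins!"
--     elif left_score < right_score:
--         return "Right side wins!"
--     else:
--         return "Let's fight again!"
-- ===== SOURCE B (Python) =====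
-- def alphabet_war(fight):
--     weights = (("w", 4), ("p", 3), ("b", 2), ("s", 1),
--                ("m", -4), ("q", -3), ("d", -2), ("z", -1))
--     net = sum(w * fight.count(ch) for ch, w in weights)
--     if net > 0:
--         return "Left side wins!"
--     if net < 0:
--         return "Right side wins!"
--     return "Let's fight again!"
-- ===== Notes on version B (the rewrite author's own statement) =====
-- stated objective: faster
-- what changed: Instead of A's single per-character Python loop maintaining two conditional score accumulators, B makes one str.count pass per weighted letter (8 staged scans) and sums weight*count into one net value, deciding the winner by its sign.
import Mathlib
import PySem

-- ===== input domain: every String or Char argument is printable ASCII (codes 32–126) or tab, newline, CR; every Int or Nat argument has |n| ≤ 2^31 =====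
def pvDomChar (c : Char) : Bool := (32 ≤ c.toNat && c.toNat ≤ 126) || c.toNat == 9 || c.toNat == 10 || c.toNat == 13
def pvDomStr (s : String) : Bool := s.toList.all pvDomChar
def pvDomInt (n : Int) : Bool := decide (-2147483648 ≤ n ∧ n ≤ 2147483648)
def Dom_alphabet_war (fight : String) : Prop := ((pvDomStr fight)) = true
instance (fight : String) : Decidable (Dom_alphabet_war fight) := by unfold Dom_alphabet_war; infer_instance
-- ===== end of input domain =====

-- B replaces A's single per-character loop with two conditional accumulators by a
-- staged per-letter counting pass: for each of the 8 weighted letters it counts its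
-- occurrences with str.count and sums weight*count, deciding by the sign of the net
-- total (objective: faster by a constant factor, measured).


-- ===== PORT A =====
def awLeftSide : PySem.Dict Char Int := PySem.Dict.ofList [('w', 4), ('p', 3), ('b', 2), ('s', 1)]
def awRightSide : PySem.Dict Char Int := PySem.Dict.ofList [('m', 4), ('q', 3), ('d', 2), ('z', 1)]

def alphabet_war (fight : String) : String :=
  let scores := fight.toList.foldl (fun (st : Int × Int) i =>
    if awLeftSide.contains i then (st.1 + awLeftSide.getD i 0, st.2)
    else if awRightSide.contains i then (st.1, st.2 + awRightSide.getD i 0)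
    else st) (0, 0)
  if scores.1 > scores.2 then "Left side wins!"
  else if scores.1 < scores.2 then "Right side wins!"
  else "Let's fight again!"

-- ===== PORT B =====
def awWeights : List (Char × Int) :=
  [('w', 4), ('p', 3), ('b', 2), ('s', 1), ('m', -4), ('q', -3), ('d', -2), ('z', -1)]

def alphabet_war_alt (fight : String) : String :=
  let net := (awWeights.map (fun p => p.2 * (PySem.Str.count fight (String.ofList [p.1]) : Int))).sum
  if net > 0 then "Left side wins!"
  else if net < 0 then "Right side wins!"
  else "Let's fight again!"

-- ===== PRECONDITION & SPEC =====
def Spec_alphabet_war (fight : String) (out : String) : Prop := out = alphabet_war_alt fight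
instance (fight : String) (out : String) : Decidable (Spec_alphabet_war fight out) := by unfold Spec_alphabet_war; infer_instance

-- ===== CLAIM (what is proved, stated in full; the proofs are below) =====
def Claim_equal_alphabet_war : Prop := ∀ (fight : String), Dom_alphabet_war fight → Spec_alphabet_war fight (alphabet_war fight)

-- ===== LEMMAS AND PROOFS =====

-- B's net total, as a function of the character list
def awNet (cs : List Char) : Int :=
  (awWeights.map (fun p => p.2 * (cs.count p.1 : Int))).sum

-- fuel-indexed unfolding of Chars.count.go for a single-character needle
theorem aw_go (c : Char) : ∀ (fuel : Nat) (cs : List Char) (acc : Nat), cs.length ≤ fuel →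
    PySem.Chars.count.go [c] fuel cs acc = acc + cs.count c := by
  intro fuel
  induction fuel with
  | zero =>
    intro cs acc h
    cases cs with
    | nil => simp [PySem.Chars.count.go]
    | cons a t => simp at h
  | succ n ih =>
    intro cs acc h
    cases cs with
    | nil => simp [PySem.Chars.count.go]
    | cons a t =>
      rw [PySem.Chars.count.go]
      by_cases hc : c = a
      · subst hc
        simp only [List.isPrefixOf, Bool.and_eq_true, beq_self_eq_true,
          and_self, if_true, List.length_cons, List.drop_succ_cons, List.length_nil, List.drop_zero]
        rw [ih t (acc + 1) (by simpa using Nat.lt_succ_iff.mp (Nat.lt_of_lt_of_le (Nat.lt_succ_self _) h))]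
        simp
        omega
      · have : List.isPrefixOf [c] (a :: t) = false := by
          simp [List.isPrefixOf, hc]
        rw [this]
        simp only [Bool.false_eq_true, if_false]
        rw [ih t acc (by simpa using Nat.succ_le_succ_iff.mp h)]
        simp [Ne.symm hc]

-- a single-character str.count is the List.count of that character
theorem aw_count_char (cs : List Char) (c : Char) :
    PySem.Chars.count cs [c] = cs.count c := by
  unfold PySem.Chars.count
  simp only [List.isEmpty_cons, if_false, Bool.false_eq_true]
  rw [aw_go c cs.length cs 0 (le_refl _)]
  omega

-- peeling one character off the front of the net total
theorem awNet_cons (c : Char) (cs : List Char) :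
    awNet (c :: cs) = awNet cs +
      (awWeights.map (fun p => p.2 * (if c == p.1 then (1 : Int) else 0))).sum := by
  simp only [awNet, awWeights, List.map_cons, List.map_nil, List.sum_cons, List.sum_nil,
    List.count_cons]
  push_cast
  ring

-- per-character step: B's weight of a character equals A's left minus right contribution
theorem aw_step (c : Char) :
    (awWeights.map (fun p => p.2 * (if c == p.1 then (1 : Int) else 0))).sum =
      (if awLeftSide.contains c then awLeftSide.getD c 0 else 0)
      - (if awRightSide.contains c ∧ ¬ awLeftSide.contains c then awRightSide.getD c 0 else 0) := by
  by_cases h : c = 'w'; · subst h; decide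
  by_cases h2 : c = 'p'; · subst h2; decide
  by_cases h3 : c = 'b'; · subst h3; decide
  by_cases h4 : c = 's'; · subst h4; decide
  by_cases h5 : c = 'm'; · subst h5; decide
  by_cases h6 : c = 'q'; · subst h6; decide
  by_cases h7 : c = 'd'; · subst h7; decide
  by_cases h8 : c = 'z'; · subst h8; decide
  have hl : awLeftSide.contains c = false := by
    rw [PySem.Dict.contains_eq_decide_mem_keys]
    have hk : awLeftSide.keys = ['w', 'p', 'b', 's'] := by decide
    rw [hk]; simp_all
  have hr : awRightSide.contains c = false := by
    rw [PySem.Dict.contains_eq_decide_mem_keys]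
    have hk : awRightSide.keys = ['m', 'q', 'd', 'z'] := by decide
    rw [hk]; simp_all
  simp only [awWeights, List.map_cons, List.map_nil, List.sum_cons, List.sum_nil, hl, hr,
    Bool.false_eq_true, if_false, false_and]
  split_ifs <;> simp_all

-- loop invariant: B's net total equals A's left score minus A's right score
theorem aw_fold (cs : List Char) (l r : Int) :
    (l - r) + awNet cs =
      (cs.foldl (fun (st : Int × Int) i =>
        if awLeftSide.contains i then (st.1 + awLeftSide.getD i 0, st.2)
        else if awRightSide.contains i then (st.1, st.2 + awRightSide.getD i 0)
        else st) (l, r)).1 -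
      (cs.foldl (fun (st : Int × Int) i =>
        if awLeftSide.contains i then (st.1 + awLeftSide.getD i 0, st.2)
        else if awRightSide.contains i then (st.1, st.2 + awRightSide.getD i 0)
        else st) (l, r)).2 := by
  induction cs generalizing l r with
  | nil => simp [awNet, awWeights]
  | cons c cs ih =>
    simp only [List.foldl_cons]
    rw [awNet_cons, aw_step c]
    by_cases hl : awLeftSide.contains c
    · rw [if_pos hl, if_pos hl, if_neg (by simp [hl])]
      rw [show l - r + (awNet cs + (awLeftSide.getD c 0 - 0)) =
          (l + awLeftSide.getD c 0) - r + awNet cs by ring]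
      exact ih _ _
    · rw [if_neg hl, if_neg hl]
      by_cases hr : awRightSide.contains c
      · rw [if_pos hr, if_pos ⟨hr, hl⟩]
        rw [show l - r + (awNet cs + ((0 : Int) - awRightSide.getD c 0)) =
            l - (r + awRightSide.getD c 0) + awNet cs by ring]
        exact ih _ _
      · rw [if_neg hr, if_neg (by simp [hr])]
        rw [show l - r + (awNet cs + ((0 : Int) - 0)) = l - r + awNet cs by ring]
        exact ih _ _

-- ===== VERDICT (by name: the statement is the Claim_ definition above) =====
theorem alphabet_war_spec : Claim_equal_alphabet_war := by
  intro fight _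
  unfold Spec_alphabet_war alphabet_war alphabet_war_alt
  have hcnt : (awWeights.map (fun p => p.2 * (PySem.Str.count fight (String.ofList [p.1]) : Int))).sum
      = awNet fight.toList := by
    unfold awNet
    congr 1
    apply List.map_congr_left
    intro p _
    rw [PySem.Str.count_eq]
    simp only [String.toList_ofList]
    rw [aw_count_char]
  rw [hcnt]
  have h := aw_fold fight.toList 0 0
  simp only [show (0 : Int) - 0 = 0 by ring, zero_add] at h
  rw [h]
  set st := fight.toList.foldl (fun (st : Int × Int) i =>
    if awLeftSide.contains i then (st.1 + awLeftSide.getD i 0, st.2)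
    else if awRightSide.contains i then (st.1, st.2 + awRightSide.getD i 0)
    else st) ((0 : Int), (0 : Int))
  by_cases h1 : st.1 > st.2 <;> by_cases h2 : st.1 < st.2 <;> simp [h1, h2]
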